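-- pv_equiv track=rewrite | github.com/flo0705/aoc24 | 12.py | get_neighbours_count
-- ===== SOURCE A (Python) =====
-- def get_neighbours_count(region, elem):
--     count = 0
--     neigs = []
--     for r in region:
--         diff0 = abs(r[0] - elem[0])
--         diff1 = abs(r[1] - elem[1])
--         if diff0 + diff1 == 1:
--             count += 1
--             neigs.append(r)
--
--
--     if count == 2 and len(set([neig[0] for neig in neigs])) == 1 :
--         return 0
--
--     if count == 2 and len(set([neig[1] for neig in neigs])) == 1:
--         return 0
--     return count
-- ===== SOURCE B (Python) =====
-- def get_neighbours_count(region, elem):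
--     counts = {}
--     for r in region:
--         key = (r[0], r[1])
--         counts[key] = counts.get(key, 0) + 1
--     x, y = elem[0], elem[1]
--     v = counts.get((x - 1, y), 0) + counts.get((x + 1, y), 0)
--     h = counts.get((x, y - 1), 0) + counts.get((x, y + 1), 0)
--     total = v + h
--     if total == 2 and (v == 0 or h == 0):
--         return 0
--     return total
-- ===== Notes on version B (the rewrite author's own statement) =====
-- stated objective: idiomatic
-- what changed: Replaces the per-element distance scan plus two set-of-coordinates collinearity tests with a positional multiplicity index (dict counter) built once, four direct neighbour lookups, and an arithmetic axis test (total==2 and one axis empty).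
import Mathlib
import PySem

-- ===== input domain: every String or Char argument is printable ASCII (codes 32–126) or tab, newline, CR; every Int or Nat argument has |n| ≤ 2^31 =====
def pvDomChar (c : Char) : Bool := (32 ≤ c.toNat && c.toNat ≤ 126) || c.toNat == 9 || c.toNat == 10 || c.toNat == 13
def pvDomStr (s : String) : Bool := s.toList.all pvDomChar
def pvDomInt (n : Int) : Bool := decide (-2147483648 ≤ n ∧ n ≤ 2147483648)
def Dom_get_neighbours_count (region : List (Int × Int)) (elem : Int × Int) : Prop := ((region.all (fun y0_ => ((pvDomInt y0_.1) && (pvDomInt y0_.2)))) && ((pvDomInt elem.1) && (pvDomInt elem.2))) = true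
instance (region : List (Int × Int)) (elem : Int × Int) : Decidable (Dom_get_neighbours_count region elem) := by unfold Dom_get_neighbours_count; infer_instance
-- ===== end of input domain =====

-- B indexes the region's positions in a counter once and decides from four neighbour lookups;
-- idiomatic alternative to A's distance scan + set tests, same O(n) cost.


-- ===== PORT A =====
def get_neighbours_count (region : List (Int × Int)) (elem : Int × Int) : Int :=
  let st := region.foldl (fun (st : Int × List (Int × Int)) r =>
      let diff0 := (r.1 - elem.1).natAbs
      let diff1 := (r.2 - elem.2).natAbs
      if diff0 + diff1 = 1 then (st.1 + 1, st.2 ++ [r]) else st) ((0 : Int), ([] : List (Int × Int)))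
  let count := st.1
  let neigs := st.2
  if count = 2 ∧ (PySem.Set.ofList (neigs.map (fun neig => neig.1))).length = 1 then 0
  else if count = 2 ∧ (PySem.Set.ofList (neigs.map (fun neig => neig.2))).length = 1 then 0
  else count

-- ===== PORT B =====
-- B: build a positional multiplicity index once, then four direct neighbour lookups and an
-- arithmetic axis test — no per-element distance scan, no set-of-coordinates collinearity test.
def get_neighbours_count_alt (region : List (Int × Int)) (elem : Int × Int) : Int :=
  let counts := region.foldl (fun (d : PySem.Dict (Int × Int) Int) r =>
      d.insert (r.1, r.2) (d.getD (r.1, r.2) 0 + 1)) PySem.Dict.empty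
  let x := elem.1
  let y := elem.2
  let v := counts.getD (x - 1, y) 0 + counts.getD (x + 1, y) 0
  let h := counts.getD (x, y - 1) 0 + counts.getD (x, y + 1) 0
  let total := v + h
  if total = 2 ∧ (v = 0 ∨ h = 0) then 0 else total

-- ===== PRECONDITION & SPEC =====
def Spec_get_neighbours_count (region : List (Int × Int)) (elem : Int × Int) (out : Int) : Prop := out = get_neighbours_count_alt region elem
instance (region : List (Int × Int)) (elem : Int × Int) (out : Int) : Decidable (Spec_get_neighbours_count region elem out) := by unfold Spec_get_neighbours_count; infer_instance

-- ===== CLAIM (what is proved, stated in full; the proofs are below) =====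
def Claim_equal_get_neighbours_count : Prop := ∀ (region : List (Int × Int)) (elem : Int × Int), Dom_get_neighbours_count region elem → Spec_get_neighbours_count region elem (get_neighbours_count region elem)

-- ===== LEMMAS AND PROOFS =====


-- neighbour predicate of A's loop
def pvNb (elem : Int × Int) (r : Int × Int) : Bool :=
  decide ((r.1 - elem.1).natAbs + (r.2 - elem.2).natAbs = 1)

lemma pvNb_iff (elem r : Int × Int) :
    pvNb elem r = true ↔
      r = (elem.1 - 1, elem.2) ∨ r = (elem.1 + 1, elem.2) ∨
      r = (elem.1, elem.2 - 1) ∨ r = (elem.1, elem.2 + 1) := by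
  obtain ⟨a, b⟩ := r
  obtain ⟨x, y⟩ := elem
  simp only [pvNb, decide_eq_true_eq, Prod.mk.injEq]
  omega

lemma pvFold_spec (elem : Int × Int) (region : List (Int × Int)) (c : Int)
    (l : List (Int × Int)) :
    region.foldl (fun (st : Int × List (Int × Int)) r =>
        let diff0 := (r.1 - elem.1).natAbs
        let diff1 := (r.2 - elem.2).natAbs
        if diff0 + diff1 = 1 then (st.1 + 1, st.2 ++ [r]) else st) (c, l)
      = (c + ((region.filter (pvNb elem)).length : Int), l ++ region.filter (pvNb elem)) := by
  induction region generalizing c l with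
  | nil => simp
  | cons a t ih =>
    simp only [List.foldl_cons, List.filter_cons]
    by_cases h : pvNb elem a = true
    · simp only [pvNb, decide_eq_true_eq] at h
      rw [if_pos h]
      rw [ih]
      simp only [pvNb, h, decide_true, if_pos]
      refine Prod.ext ?_ ?_
      · simp only [List.length_cons]
        push_cast
        ring
      · simp
    · simp only [pvNb, decide_eq_true_eq] at h
      rw [if_neg h]
      rw [ih]
      simp only [pvNb, h, decide_false]
      simp

lemma pvFilter_length (elem : Int × Int) (region : List (Int × Int)) :
    (region.filter (pvNb elem)).length =
      region.count (elem.1 - 1, elem.2) + region.count (elem.1 + 1, elem.2) +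
      region.count (elem.1, elem.2 - 1) + region.count (elem.1, elem.2 + 1) := by
  induction region with
  | nil => simp
  | cons a t ih =>
    simp only [List.filter_cons, List.count_cons]
    by_cases h : pvNb elem a = true
    · rw [if_pos h]
      rcases (pvNb_iff elem a).mp h with h1 | h1 | h1 | h1 <;>
        · subst h1
          obtain ⟨x, y⟩ := elem
          simp only [List.length_cons, ih, Prod.mk.injEq, beq_iff_eq]
          split_ifs <;> omega
    · rw [if_neg h]
      have := (pvNb_iff elem a).not.mp (by simp [h])
      push Not at this
      obtain ⟨x, y⟩ := elem
      obtain ⟨h1, h2, h3, h4⟩ := this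
      simp only [ih, beq_iff_eq]
      split_ifs <;> simp_all

lemma pvCount_filter (elem r : Int × Int) (region : List (Int × Int))
    (h : pvNb elem r = true) :
    (region.filter (pvNb elem)).count r = region.count r := by
  rw [List.count_filter]
  simp [h]


lemma pvSet_two (u v : Int) :
    (PySem.Set.ofList [u, v]).length = if u = v then 1 else 2 := by
  simp only [PySem.Set.ofList, List.foldl, PySem.Set.add, PySem.Set.contains]
  split_ifs <;> simp_all


lemma pvNe1 (a : Int) : (a - 1 = a + 1) = False := by simp only [eq_iff_iff, iff_false]; omega
lemma pvNe2 (a : Int) : (a + 1 = a - 1) = False := by simp only [eq_iff_iff, iff_false]; omega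
lemma pvNe3 (a : Int) : (a - 1 = a) = False := by simp only [eq_iff_iff, iff_false]; omega
lemma pvNe4 (a : Int) : (a = a - 1) = False := by simp only [eq_iff_iff, iff_false]; omega
lemma pvNe5 (a : Int) : (a + 1 = a) = False := by simp only [eq_iff_iff, iff_false]; omega
lemma pvNe6 (a : Int) : (a = a + 1) = False := by simp only [eq_iff_iff, iff_false]; omega

-- ===== VERDICT (by name: the statement is the Claim_ definition above) =====
set_option maxHeartbeats 1000000 in
theorem get_neighbours_count_spec : Claim_equal_get_neighbours_count := by
  intro region elem _
  obtain ⟨x, y⟩ := elem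
  unfold Spec_get_neighbours_count
  simp only [get_neighbours_count, get_neighbours_count_alt, Prod.mk.eta,
    PySem.Dict.getD_foldl_insert_add_one, PySem.Dict.getD_empty, zero_add]
  have hf := pvFold_spec (x, y) region 0 []
  dsimp only at hf
  rw [hf]
  dsimp only
  simp only [List.nil_append, zero_add]
  have hsum := pvFilter_length (x, y) region
  by_cases hlen : (List.filter (pvNb (x, y)) region).length = 2
  · obtain ⟨a, b, hab⟩ := List.length_eq_two.mp hlen
    have pa : pvNb (x, y) a = true := by
      have ha : a ∈ List.filter (pvNb (x, y)) region := by rw [hab]; simp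
      exact (List.mem_filter.mp ha).2
    have pb : pvNb (x, y) b = true := by
      have hb : b ∈ List.filter (pvNb (x, y)) region := by rw [hab]; simp
      exact (List.mem_filter.mp hb).2
    have n1 : pvNb (x, y) (x - 1, y) = true := by
      simp only [pvNb, decide_eq_true_eq]; omega
    have n2 : pvNb (x, y) (x + 1, y) = true := by
      simp only [pvNb, decide_eq_true_eq]; omega
    have n3 : pvNb (x, y) (x, y - 1) = true := by
      simp only [pvNb, decide_eq_true_eq]; omega
    have n4 : pvNb (x, y) (x, y + 1) = true := by
      simp only [pvNb, decide_eq_true_eq]; omega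
    rw [← pvCount_filter (x, y) _ region n1, ← pvCount_filter (x, y) _ region n2,
        ← pvCount_filter (x, y) _ region n3, ← pvCount_filter (x, y) _ region n4, hab]
    clear hsum hlen n1 n2 n3 n4 hab hf
    rcases (pvNb_iff (x, y) a).mp pa with ha | ha | ha | ha <;>
      rcases (pvNb_iff (x, y) b).mp pb with hb | hb | hb | hb <;>
        subst ha <;> subst hb
    all_goals simp only [List.map_cons, List.map_nil, pvSet_two, List.count_cons,
      List.count_nil, List.length_cons, List.length_nil, beq_iff_eq,
      Prod.mk.injEq, pvNe1, pvNe2, pvNe3, pvNe4, pvNe5, pvNe6, eq_self_iff_true,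
      and_true, true_and, and_false, false_and, and_self, or_false, false_or, or_self,
      if_true, if_false, ite_true, ite_false]
    all_goals norm_num
  · have hInt : (((List.filter (pvNb (x, y)) region).length : Int)) =
        (region.count (x - 1, y) : Int) + (region.count (x + 1, y) : Int) +
        ((region.count (x, y - 1) : Int) + (region.count (x, y + 1) : Int)) := by
      rw [hsum]; push_cast; ring
    have h2 : ((List.filter (pvNb (x, y)) region).length : Int) ≠ 2 := by
      intro h; exact hlen (by exact_mod_cast h)
    rw [if_neg (fun h => h2 h.1), if_neg (fun h => h2 h.1),
        if_neg (fun h => h2 (hInt.trans h.1))]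
    exact hInt
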